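-- pv_equiv track=rewrite | github.com/vshilman/shadowframework20lite | trunk/BlenderSFBExporter2/algorithm1.py | remove_intersections
-- ===== SOURCE A (Python) =====
-- def remove_intersections(macro_edges, singular_verts_indexes):
--     '''Remove the intersected vertices'''
--     new_edges = sorted(macro_edges, key=len)
--     result = []
--     for e in new_edges:
--         inner_verts = set(sum(result, ())) - set(singular_verts_indexes)
--         if len(set(e) & inner_verts) == 0:
--             result.append(e)
--     return result
-- ===== SOURCE B (Python) =====
-- def remove_intersections(macro_edges, singular_verts_indexes):
--     '''Remove the intersected vertices'''
--     singular = set(singular_verts_indexes)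
--     inner = set()          # non-singular vertices of edges kept so far
--     result = []
--     for e in sorted(macro_edges, key=len):
--         if inner.isdisjoint(e):
--             result.append(e)
--             inner.update(v for v in e if v not in singular)
--     return result
-- ===== Notes on version B (the rewrite author's own statement) =====
-- stated objective: faster
-- what changed: B maintains the set of accepted non-singular inner vertices incrementally, adding each kept edge's vertices once, instead of A's per-iteration reflattening of the whole result (sum(result, ())) and rebuilding of the deduplicated vertex set.
import Mathlib
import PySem

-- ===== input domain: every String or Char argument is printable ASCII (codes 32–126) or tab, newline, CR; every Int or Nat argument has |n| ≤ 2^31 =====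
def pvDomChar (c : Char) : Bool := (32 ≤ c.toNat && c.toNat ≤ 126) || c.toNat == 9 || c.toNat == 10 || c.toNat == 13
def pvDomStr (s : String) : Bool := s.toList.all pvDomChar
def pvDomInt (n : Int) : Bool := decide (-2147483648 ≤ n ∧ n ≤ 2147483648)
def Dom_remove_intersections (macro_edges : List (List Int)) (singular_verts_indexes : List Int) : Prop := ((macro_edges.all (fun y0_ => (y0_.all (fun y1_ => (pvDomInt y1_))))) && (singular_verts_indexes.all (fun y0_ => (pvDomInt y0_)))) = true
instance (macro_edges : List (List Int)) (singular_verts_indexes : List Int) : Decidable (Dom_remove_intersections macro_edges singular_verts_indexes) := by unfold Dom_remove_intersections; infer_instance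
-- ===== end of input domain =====

-- B maintains the accepted inner-vertex set incrementally (adding each kept edge's
-- non-singular vertices once) instead of reflattening and re-deduplicating the whole
-- result on every iteration, as A does.

-- ===== PORT A =====
def remove_intersections (macro_edges : List (List Int)) (singular_verts_indexes : List Int) : List (List Int) :=
  let new_edges := PySem.List.sorted macro_edges (fun e => (e.length : Int)) false
  new_edges.foldl (fun result e =>
    -- inner_verts = set(sum(result, ())) - set(singular_verts_indexes): tuple concatenation = flatten
    let inner_verts := PySem.Set.diff (PySem.Set.ofList result.flatten) (PySem.Set.ofList singular_verts_indexes)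
    if PySem.Set.len (PySem.Set.inter (PySem.Set.ofList e) inner_verts) == 0 then
      result ++ [e]
    else result) []

-- ===== PORT B =====
def remove_intersections_alt (macro_edges : List (List Int)) (singular_verts_indexes : List Int) : List (List Int) :=
  let singular := PySem.Set.ofList singular_verts_indexes
  ((PySem.List.sorted macro_edges (fun e => (e.length : Int)) false).foldl
    (fun (st : PySem.Set Int × List (List Int)) e =>
      if PySem.Set.isdisjoint st.1 e then
        -- inner.update(v for v in e if v not in singular)
        (e.foldl (fun s v => if PySem.Set.contains singular v then s else PySem.Set.add s v) st.1,
         st.2 ++ [e])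
      else st)
    (PySem.Set.empty, [])).2

-- ===== PRECONDITION & SPEC =====
def Spec_remove_intersections (macro_edges : List (List Int)) (singular_verts_indexes : List Int) (out : List (List Int)) : Prop := out = remove_intersections_alt macro_edges singular_verts_indexes
instance (macro_edges : List (List Int)) (singular_verts_indexes : List Int) (out : List (List Int)) : Decidable (Spec_remove_intersections macro_edges singular_verts_indexes out) := by unfold Spec_remove_intersections; infer_instance

-- ===== CLAIM (what is proved, stated in full; the proofs are below) =====
def Claim_equal_remove_intersections : Prop := ∀ (macro_edges : List (List Int)) (singular_verts_indexes : List Int), Dom_remove_intersections macro_edges singular_verts_indexes → Spec_remove_intersections macro_edges singular_verts_indexes (remove_intersections macro_edges singular_verts_indexes)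

-- ===== LEMMAS AND PROOFS =====

-- membership after B's incremental update of the inner-vertex set
theorem mem_inner_update (sing : List Int) (v : Int) :
    ∀ (e : List Int) (s : PySem.Set Int),
      v ∈ e.foldl (fun s w => if PySem.Set.contains (PySem.Set.ofList sing) w then s else PySem.Set.add s w) s
        ↔ v ∈ s ∨ (v ∈ e ∧ v ∉ sing) := by
  intro e
  induction e with
  | nil => simp
  | cons w e ih =>
    intro s
    simp only [List.foldl_cons]
    by_cases hw : w ∈ sing
    · rw [if_pos (by simp [PySem.Set.mem_ofList]; exact hw), ih]
      simp only [List.mem_cons]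
      have hvw : v = w → v ∈ sing := fun h => h ▸ hw
      tauto
    · rw [if_neg (by simp [PySem.Set.mem_ofList]; exact hw), ih]
      simp only [List.mem_cons, PySem.Set.mem_add]
      have hvw : v = w → v ∉ sing := fun h => h ▸ hw
      tauto

-- A's acceptance test, read as a statement about membership
theorem condA_iff (sing : List Int) (fl e : List Int) :
    (PySem.Set.len (PySem.Set.inter (PySem.Set.ofList e)
        (PySem.Set.diff (PySem.Set.ofList fl) (PySem.Set.ofList sing))) == 0) = true
      ↔ ∀ v ∈ e, ¬(v ∈ fl ∧ v ∉ sing) := by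
  rw [beq_iff_eq]
  unfold PySem.Set.len
  rw [Int.natCast_eq_zero, List.length_eq_zero_iff, List.eq_nil_iff_forall_not_mem]
  constructor
  · intro h v hv hmem
    exact h v (by
      rw [PySem.Set.mem_inter, PySem.Set.mem_ofList, PySem.Set.mem_diff,
        PySem.Set.mem_ofList, PySem.Set.mem_ofList]
      exact ⟨hv, hmem⟩)
  · intro h v hv
    rw [PySem.Set.mem_inter, PySem.Set.mem_ofList, PySem.Set.mem_diff,
      PySem.Set.mem_ofList, PySem.Set.mem_ofList] at hv
    exact h v hv.1 hv.2

-- the loop invariant: B's set holds exactly the non-singular vertices of A's result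
theorem loop_eq (sing : List Int) :
    ∀ (ns : List (List Int)) (r : List (List Int)) (s : PySem.Set Int),
      (∀ v : Int, v ∈ s ↔ v ∈ r.flatten ∧ v ∉ sing) →
      (ns.foldl
        (fun (st : PySem.Set Int × List (List Int)) e =>
          if PySem.Set.isdisjoint st.1 e then
            (e.foldl (fun s v => if PySem.Set.contains (PySem.Set.ofList sing) v then s else PySem.Set.add s v) st.1,
             st.2 ++ [e])
          else st)
        (s, r)).2
      = ns.foldl
        (fun result e =>
          let inner_verts := PySem.Set.diff (PySem.Set.ofList result.flatten) (PySem.Set.ofList sing)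
          if PySem.Set.len (PySem.Set.inter (PySem.Set.ofList e) inner_verts) == 0 then
            result ++ [e]
          else result) r := by
  intro ns
  induction ns with
  | nil => intro r s _; rfl
  | cons e ns ih =>
    intro r s hinv
    simp only [List.foldl_cons]
    by_cases hacc : ∀ v ∈ e, ¬(v ∈ r.flatten ∧ v ∉ sing)
    · have hA : (PySem.Set.len (PySem.Set.inter (PySem.Set.ofList e)
          (PySem.Set.diff (PySem.Set.ofList r.flatten) (PySem.Set.ofList sing))) == 0) = true :=
        (condA_iff sing r.flatten e).mpr hacc
      have hB : PySem.Set.isdisjoint s e = true := by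
        rw [PySem.Set.isdisjoint_iff]
        intro v hv hve
        exact hacc v hve ((hinv v).mp hv)
      rw [hB, hA]
      simp only [if_true]
      apply ih
      intro v
      rw [mem_inner_update, hinv v]
      simp only [List.flatten_append, List.flatten_cons, List.flatten_nil, List.append_nil,
        List.mem_append]
      tauto
    · push Not at hacc
      obtain ⟨v, hve, hvr, hvs⟩ := hacc
      have hA : (PySem.Set.len (PySem.Set.inter (PySem.Set.ofList e)
          (PySem.Set.diff (PySem.Set.ofList r.flatten) (PySem.Set.ofList sing))) == 0) = false := by
        rw [Bool.eq_false_iff]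
        intro h
        exact (condA_iff sing r.flatten e).mp h v hve ⟨hvr, hvs⟩
      have hB : PySem.Set.isdisjoint s e = false := by
        rw [Bool.eq_false_iff]
        intro h
        rw [PySem.Set.isdisjoint_iff] at h
        exact h v ((hinv v).mpr ⟨hvr, hvs⟩) hve
      rw [hB, hA]
      simp only [Bool.false_eq_true, if_false]
      exact ih r s hinv

-- ===== VERDICT (by name: the statement is the Claim_ definition above) =====
theorem remove_intersections_spec : Claim_equal_remove_intersections := by
  intro macro_edges singular_verts_indexes _hDom
  unfold Spec_remove_intersections remove_intersections remove_intersections_alt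
  exact (loop_eq singular_verts_indexes
    (PySem.List.sorted macro_edges (fun e => (e.length : Int)) false) [] PySem.Set.empty
    (by intro v; simp [PySem.Set.empty])).symm ▸ rfl
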